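-- pv_equiv track=rewrite | github.com/zegameiro/LEI_UA_1ano | 1ºsemestre/FP/Practice/exercise 3.py | positionDifferenceFirstLastLargest
-- ===== SOURCE A (Python) =====
-- def positionDifferenceFirstLastLargest(lst):
--     maxi = lst[0]
--
--     for x in lst:
--         if x > maxi:
--             maxi = x
--
--     for a in range(len(lst)):
--         if lst[a] == maxi:
--             f = a
--             break
--
--     for a in range(len(lst) - 1, -1, -1):
--         if lst[a] == maxi:
--             l = a
--             break
--     total = f - l
--
--     return total
-- ===== SOURCE B (Python) =====
-- def positionDifferenceFirstLastLargest(lst):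
--     maxi = lst[0]
--     f = l = 0
--     for i, x in enumerate(lst[1:], 1):
--         if x > maxi:
--             maxi, f, l = x, i, i
--         elif x == maxi:
--             l = i
--     return f - l
-- ===== Notes on version B (the rewrite author's own statement) =====
-- stated objective: alternative
-- what changed: A finds the max in one scan, then scans forward for the first index and backward for the last index (three separate passes); B makes a single enumerate pass maintaining the running max together with its first and last positions as loop state.
import Mathlib
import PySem

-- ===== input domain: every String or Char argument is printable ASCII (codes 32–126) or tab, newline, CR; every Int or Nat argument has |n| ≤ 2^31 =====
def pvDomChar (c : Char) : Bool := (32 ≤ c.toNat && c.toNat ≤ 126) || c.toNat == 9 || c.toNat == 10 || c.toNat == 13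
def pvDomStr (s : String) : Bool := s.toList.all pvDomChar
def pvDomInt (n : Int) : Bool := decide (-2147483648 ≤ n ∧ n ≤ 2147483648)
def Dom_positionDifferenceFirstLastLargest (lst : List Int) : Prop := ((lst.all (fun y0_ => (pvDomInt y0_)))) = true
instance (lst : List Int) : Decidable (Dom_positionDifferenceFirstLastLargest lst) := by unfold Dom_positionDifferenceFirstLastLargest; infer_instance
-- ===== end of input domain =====

-- B replaces A's three scans (find max; forward scan for first index; backward scan for
-- last index) by one pass maintaining the running max and its first and last positions.

-- ===== PORT A =====
-- "for a in range(len(lst)): if lst[a] == maxi: f = a; break" — forward scan, index i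
def pvFindFirst : List Int → Int → Int → Int
  | [], _, _ => 0          -- no break: f undefined in Python; unreachable, maxi is in lst
  | x :: t, m, i => if x = m then i else pvFindFirst t m (i + 1)

-- "for a in range(len(lst)-1, -1, -1): if lst[a] == maxi: l = a; break" — backward scan
def pvFindLast (lst : List Int) (m : Int) : Nat → Int
  | 0 => 0                 -- no break: unreachable, maxi is in lst
  | n + 1 => if lst.getD n 0 = m then (n : Int) else pvFindLast lst m n

def positionDifferenceFirstLastLargest (lst : List Int) : Int :=
  match lst with
  | [] => 0                -- Python raises IndexError on lst[0]; excluded by Pre_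
  | h :: _ =>
    let maxi := lst.foldl (fun m x => if x > m then x else m) h
    let f := pvFindFirst lst maxi 0
    let l := pvFindLast lst maxi lst.length
    f - l

-- ===== PORT B =====
-- single pass over the tail with state (maxi, f, l), index i
def pvAltLoop : List Int → Int → Int → Int → Int → Int × Int × Int
  | [], _, maxi, f, l => (maxi, f, l)
  | x :: t, i, maxi, f, l =>
    if x > maxi then pvAltLoop t (i + 1) x i i
    else if x = maxi then pvAltLoop t (i + 1) maxi f i
    else pvAltLoop t (i + 1) maxi f l

def positionDifferenceFirstLastLargest_alt (lst : List Int) : Int :=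
  match lst with
  | [] => 0                -- Python raises IndexError on lst[0]; excluded by Pre_
  | h :: t =>
    let r := pvAltLoop t 1 h 0 0
    r.2.1 - r.2.2

-- ===== PRECONDITION & SPEC =====
-- Pre_ excludes only the empty list, on which Python A raises IndexError (lst[0]).
def Pre_positionDifferenceFirstLastLargest (lst : List Int) : Prop := lst ≠ []
instance (lst : List Int) : Decidable (Pre_positionDifferenceFirstLastLargest lst) := by unfold Pre_positionDifferenceFirstLastLargest; infer_instance
def pvWitness_positionDifferenceFirstLastLargest : List Int := [3, 7, 1, 7, 2]

def Spec_positionDifferenceFirstLastLargest (lst : List Int) (out : Int) : Prop := out = positionDifferenceFirstLastLargest_alt lst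
instance (lst : List Int) (out : Int) : Decidable (Spec_positionDifferenceFirstLastLargest lst out) := by unfold Spec_positionDifferenceFirstLastLargest; infer_instance

-- ===== CLAIM (what is proved, stated in full; the proofs are below) =====
def Claim_equal_positionDifferenceFirstLastLargest : Prop := ∀ (lst : List Int), Dom_positionDifferenceFirstLastLargest lst → Pre_positionDifferenceFirstLastLargest lst → Spec_positionDifferenceFirstLastLargest lst (positionDifferenceFirstLastLargest lst)

-- ===== LEMMAS AND PROOFS =====

-- the running max A's first loop computes
def pvFMax (m : Int) (xs : List Int) : Int := xs.foldl (fun m x => if x > m then x else m) m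

-- first index of m in xs, offset i, default d
def pvFFD : List Int → Int → Int → Int → Int
  | [], _, _, d => d
  | x :: t, m, i, d => if x = m then i else pvFFD t m (i + 1) d

-- last index of m in xs, offset i, default d
def pvFLA : List Int → Int → Int → Int → Int
  | [], _, _, d => d
  | x :: t, m, i, d => if x = m then pvFLA t m (i + 1) i else pvFLA t m (i + 1) d

theorem pvFMax_cons (m x : Int) (t : List Int) :
    pvFMax m (x :: t) = pvFMax (if x > m then x else m) t := rfl

theorem pvFMax_ge (xs : List Int) : ∀ m : Int, m ≤ pvFMax m xs := by
  induction xs with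
  | nil => intro m; simp [pvFMax]
  | cons x t ih =>
    intro m
    rw [pvFMax_cons]
    by_cases h : x > m
    · simp [h]; exact le_trans (le_of_lt h) (ih x)
    · simp [h]; exact ih m

theorem pvFMax_mem (xs : List Int) : ∀ m : Int, pvFMax m xs = m ∨ pvFMax m xs ∈ xs := by
  induction xs with
  | nil => intro m; left; rfl
  | cons x t ih =>
    intro m
    rw [pvFMax_cons]
    by_cases h : x > m
    · simp only [h, if_pos]
      rcases ih x with h1 | h1
      · right; rw [h1]; exact List.mem_cons_self
      · right; exact List.mem_cons_of_mem _ h1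
    · simp only [h, if_neg, if_false]
      rcases ih m with h1 | h1
      · left; exact h1
      · right; exact List.mem_cons_of_mem _ h1

theorem pvFFD_irrel (xs : List Int) : ∀ (m i d d' : Int), m ∈ xs → pvFFD xs m i d = pvFFD xs m i d' := by
  induction xs with
  | nil => intro m i d d' h; simp at h
  | cons x t ih =>
    intro m i d d' h
    by_cases hx : x = m
    · simp [pvFFD, hx]
    · simp only [pvFFD, hx, if_false]
      have : m ∈ t := by
        rcases List.mem_cons.mp h with h1 | h1
        · exact absurd h1.symm hx
        · exact h1
      exact ih m (i + 1) d d' this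

theorem pvFLA_irrel (xs : List Int) : ∀ (m i d d' : Int), m ∈ xs → pvFLA xs m i d = pvFLA xs m i d' := by
  induction xs with
  | nil => intro m i d d' h; simp at h
  | cons x t ih =>
    intro m i d d' h
    by_cases hx : x = m
    · simp [pvFLA, hx]
    · simp only [pvFLA, hx, if_false]
      have : m ∈ t := by
        rcases List.mem_cons.mp h with h1 | h1
        · exact absurd h1.symm hx
        · exact h1
      exact ih m (i + 1) d d' this

theorem pvAltLoop_f (xs : List Int) : ∀ (i m f l : Int),
    (pvAltLoop xs i m f l).2.1 = if m < pvFMax m xs then pvFFD xs (pvFMax m xs) i f else f := by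
  induction xs with
  | nil => intro i m f l; simp [pvAltLoop, pvFMax]
  | cons x t ih =>
    intro i m f l
    by_cases h1 : x > m
    · have hstep : pvFMax m (x :: t) = pvFMax x t := by rw [pvFMax_cons]; simp [h1]
      have hloop : pvAltLoop (x :: t) i m f l = pvAltLoop t (i + 1) x i i := by
        simp [pvAltLoop, h1]
      rw [hstep, hloop, ih]
      have hmM : m < pvFMax x t := lt_of_lt_of_le h1 (pvFMax_ge t x)
      rw [if_pos hmM]
      by_cases hx : x = pvFMax x t
      · have hnx : ¬ x < pvFMax x t := by omega
        rw [if_neg hnx]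
        simp only [pvFFD]
        rw [if_pos hx]
      · have hxM : x < pvFMax x t := lt_of_le_of_ne (pvFMax_ge t x) hx
        rw [if_pos hxM]
        have hmem : pvFMax x t ∈ t := by
          rcases pvFMax_mem t x with h | h
          · exact absurd h.symm hx
          · exact h
        simp only [pvFFD]
        rw [if_neg hx]
        exact pvFFD_irrel t _ _ _ _ hmem
    · have hstep : pvFMax m (x :: t) = pvFMax m t := by rw [pvFMax_cons]; simp [h1]
      rw [hstep]
      by_cases h2 : x = m
      · have hloop : pvAltLoop (x :: t) i m f l = pvAltLoop t (i + 1) m f i := by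
          simp [pvAltLoop, h1, h2]
        rw [hloop, ih]
        by_cases hm : m < pvFMax m t
        · simp only [if_pos hm]
          have hx : ¬ x = pvFMax m t := by omega
          simp only [pvFFD]
          rw [if_neg hx]
        · simp only [if_neg hm]
      · have hloop : pvAltLoop (x :: t) i m f l = pvAltLoop t (i + 1) m f l := by
          simp [pvAltLoop, h1, h2]
        rw [hloop, ih]
        have hx : ¬ x = pvFMax m t := by
          have := pvFMax_ge t m
          omega
        by_cases hm : m < pvFMax m t
        · simp only [if_pos hm]
          simp only [pvFFD]
          rw [if_neg hx]
        · simp only [if_neg hm]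

theorem pvAltLoop_l (xs : List Int) : ∀ (i m f l : Int),
    (pvAltLoop xs i m f l).2.2 = pvFLA xs (pvFMax m xs) i l := by
  induction xs with
  | nil => intro i m f l; rfl
  | cons x t ih =>
    intro i m f l
    by_cases h1 : x > m
    · have hstep : pvFMax m (x :: t) = pvFMax x t := by rw [pvFMax_cons]; simp [h1]
      have hloop : pvAltLoop (x :: t) i m f l = pvAltLoop t (i + 1) x i i := by
        simp [pvAltLoop, h1]
      rw [hstep, hloop, ih]
      simp only [pvFLA]
      by_cases hx : x = pvFMax x t
      · rw [if_pos hx]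
      · rw [if_neg hx]
        have hmem : pvFMax x t ∈ t := by
          rcases pvFMax_mem t x with h | h
          · exact absurd h.symm hx
          · exact h
        exact pvFLA_irrel t _ _ _ _ hmem
    · have hstep : pvFMax m (x :: t) = pvFMax m t := by rw [pvFMax_cons]; simp [h1]
      rw [hstep]
      by_cases h2 : x = m
      · have hloop : pvAltLoop (x :: t) i m f l = pvAltLoop t (i + 1) m f i := by
          simp [pvAltLoop, h1, h2]
        rw [hloop, ih]
        simp only [pvFLA]
        by_cases hx : x = pvFMax m t
        · rw [if_pos hx]
        · rw [if_neg hx]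
          have hmem : pvFMax m t ∈ t := by
            rcases pvFMax_mem t m with h | h
            · exact absurd (h2.trans h.symm) hx
            · exact h
          exact pvFLA_irrel t _ _ _ _ hmem
      · have hloop : pvAltLoop (x :: t) i m f l = pvAltLoop t (i + 1) m f l := by
          simp [pvAltLoop, h1, h2]
        rw [hloop, ih]
        have hx : ¬ x = pvFMax m t := by
          have := pvFMax_ge t m
          omega
        simp only [pvFLA]
        rw [if_neg hx]

theorem pvFFD_eq_findFirst (xs : List Int) : ∀ (m i : Int), pvFFD xs m i 0 = pvFindFirst xs m i := by
  induction xs with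
  | nil => intro m i; rfl
  | cons x t ih => intro m i; simp [pvFFD, pvFindFirst, ih]

theorem pvFLA_append (xs : List Int) (y : Int) : ∀ (m i d : Int),
    pvFLA (xs ++ [y]) m i d = if y = m then i + (xs.length : Int) else pvFLA xs m i d := by
  induction xs with
  | nil => intro m i d; simp [pvFLA]
  | cons x t ih =>
    intro m i d
    by_cases hx : x = m
    · simp only [List.cons_append, pvFLA, hx, if_pos, ih]
      by_cases hy : y = m
      · simp [hy]
        try ring
      · simp [hy]
        try ring
    · simp only [List.cons_append, pvFLA, hx, if_false, ih]
      by_cases hy : y = m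
      · simp [hy]
        try ring
      · simp [hy]
        try ring

theorem pvFindLast_append_le (xs : List Int) (y m : Int) : ∀ n, n ≤ xs.length →
    pvFindLast (xs ++ [y]) m n = pvFindLast xs m n := by
  intro n
  induction n with
  | zero => intro _; rfl
  | succ k ih =>
    intro hk
    have hk' : k < xs.length := hk
    have hget : (xs ++ [y]).getD k 0 = xs.getD k 0 := by
      simp [List.getD, List.getElem?_append_left hk']
    simp only [pvFindLast, hget]
    rw [ih (le_of_lt hk')]

theorem pvFindLast_eq_pvFLA (xs : List Int) : ∀ m : Int, m ∈ xs →
    pvFindLast xs m xs.length = pvFLA xs m 0 0 := by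
  induction xs using List.reverseRecOn with
  | nil => intro m h; simp at h
  | append_singleton xs y ih =>
    intro m hm
    have hlen : (xs ++ [y]).length = xs.length + 1 := by simp
    have hget : (xs ++ [y]).getD xs.length 0 = y := by
      simp [List.getD]
    rw [hlen]
    by_cases hy : y = m
    · simp only [pvFindLast]
      rw [hget, if_pos hy, pvFLA_append, if_pos hy]
      omega
    · have hmxs : m ∈ xs := by
        rcases List.mem_append.mp hm with h | h
        · exact h
        · simp at h; exact absurd h.symm hy
      simp only [pvFindLast]
      rw [hget, if_neg hy, pvFindLast_append_le xs y m xs.length le_rfl, ih m hmxs,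
          pvFLA_append, if_neg hy]

-- ===== VERDICT (by name: the statement is the Claim_ definition above) =====
theorem positionDifferenceFirstLastLargest_spec : Claim_equal_positionDifferenceFirstLastLargest := by
  intro lst _ hpre
  unfold Spec_positionDifferenceFirstLastLargest
  match lst with
  | [] => exact absurd rfl hpre
  | h :: t =>
    have hA : positionDifferenceFirstLastLargest (h :: t) =
        pvFindFirst (h :: t) (pvFMax h (h :: t)) 0
          - pvFindLast (h :: t) (pvFMax h (h :: t)) (h :: t).length := rfl
    have hB : positionDifferenceFirstLastLargest_alt (h :: t) =
        (pvAltLoop t 1 h 0 0).2.1 - (pvAltLoop t 1 h 0 0).2.2 := rfl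
    have hMM : pvFMax h (h :: t) = pvFMax h t := by rw [pvFMax_cons]; simp
    rw [hA, hB, hMM]
    have hmem : pvFMax h t ∈ h :: t := by
      rcases pvFMax_mem t h with h1 | h1
      · rw [h1]; exact List.mem_cons_self
      · exact List.mem_cons_of_mem _ h1
    have hf : pvFindFirst (h :: t) (pvFMax h t) 0 = (pvAltLoop t 1 h 0 0).2.1 := by
      rw [pvAltLoop_f, ← pvFFD_eq_findFirst]
      by_cases hh : h = pvFMax h t
      · have hn : ¬ h < pvFMax h t := by omega
        rw [if_neg hn]
        simp only [pvFFD]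
        rw [if_pos hh]
      · have hlt : h < pvFMax h t := lt_of_le_of_ne (pvFMax_ge t h) hh
        rw [if_pos hlt]
        simp only [pvFFD]
        rw [if_neg hh]
        norm_num
    have hl : pvFindLast (h :: t) (pvFMax h t) (h :: t).length = (pvAltLoop t 1 h 0 0).2.2 := by
      rw [pvAltLoop_l, pvFindLast_eq_pvFLA (h :: t) (pvFMax h t) hmem]
      simp only [pvFLA]
      by_cases hh : h = pvFMax h t
      · rw [if_pos hh]; norm_num
      · rw [if_neg hh]; norm_num
    rw [hf, hl]
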